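-- pv_equiv track=rewrite | github.com/r-xue/pipeline | pipeline/infrastructure/utils/weblog.py | merge_td_rows
-- ===== SOURCE A (Python) =====
-- def merge_td_rows(table):
--     """
--     Merge HTML TD rows with identical values using colspan.
--
--     Arguments:
--     table -- a list of tuples, one tuple per row, containing n elements for the n columns.
--
--     Output:
--     A list of tuples with adjusted idential values merged with colspan.
--     """
--     new_table = []
--     for row in table:
--         row_list = list(row)
--         start = 0
--         while start < len(row):
--             start_cell = row[start]
--             merge_count = 0
--             end = start+1
--
--             while end < len(row):
--                 if start_cell == row[end]:
--                     row_list[end] = ''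
--                     merge_count += 1
--                     end += 1
--                 else:
--                     break
--             if merge_count > 0:
--                 row_list[start] = row_list[start].replace('<td', fr'<td colspan="{merge_count+1}"')
--             start += 1
--
--         new_table.append(tuple(row_list))
--
--     return new_table
-- ===== SOURCE B (Python) =====
-- def merge_td_rows(table):
--     """Single left-to-right pass per row: group maximal runs of consecutive
--     equal cells, emit the first cell with a colspan and blanks for the rest."""
--     new_table = []
--     for row in table:
--         out = []
--         n = len(row)
--         i = 0
--         while i < n:
--             j = i + 1
--             while j < n and row[j] == row[i]:
--                 j += 1
--             k = j - i
--             if k > 1: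
--                 out.append(row[i].replace('<td', '<td colspan="%d"' % k))
--                 out.extend([''] * (k - 1))
--             else:
--                 out.append(row[i])
--             i = j
--         new_table.append(tuple(out))
--     return new_table
-- ===== Notes on version B (the rewrite author's own statement) =====
-- stated objective: alternative
-- what changed: B makes a single grouping pass per row, handling each maximal run of consecutive equal cells once, instead of A's outer loop that restarts the run scan (and re-applies a vacuous replace on already-blanked cells) at every index inside a run.
import Mathlib
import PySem

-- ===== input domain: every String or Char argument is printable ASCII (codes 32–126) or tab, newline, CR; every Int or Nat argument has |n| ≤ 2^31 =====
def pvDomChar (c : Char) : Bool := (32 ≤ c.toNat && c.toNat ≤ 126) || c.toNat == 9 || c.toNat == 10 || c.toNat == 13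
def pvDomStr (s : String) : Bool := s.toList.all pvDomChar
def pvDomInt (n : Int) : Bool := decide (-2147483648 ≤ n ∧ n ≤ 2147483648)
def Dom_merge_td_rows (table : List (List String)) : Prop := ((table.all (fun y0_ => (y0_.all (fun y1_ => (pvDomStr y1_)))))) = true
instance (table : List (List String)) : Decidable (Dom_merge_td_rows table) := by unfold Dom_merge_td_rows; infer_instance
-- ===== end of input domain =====

-- B re-implements the row merge as one linear grouping pass per row (A rescans the run
-- from every index inside it); equivalence of return values is proved for all inputs.

-- ===== PORT A =====
-- inner while: blank rl[end] while row[end] equals start_cell, counting merges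
def pvAInner (row : List String) (sc : String) (e : Nat) (rl : List String) (mc : Nat) :
    List String × Nat :=
  if h : e < row.length then
    if sc == row[e] then
      pvAInner row sc (e+1) (rl.set e "") (mc+1)
    else (rl, mc)
  else (rl, mc)
termination_by row.length - e

-- outer while over start = 0,1,...
def pvAOuter (row : List String) (s : Nat) (rl : List String) : List String :=
  if h : s < row.length then
    let p := pvAInner row row[s] (s+1) rl 0
    let rl' :=
      if 0 < p.2 then
        p.1.set s (PySem.Str.replace (p.1.getD s "")
          "<td" ("<td colspan=\"" ++ toString (p.2 + 1) ++ "\""))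
      else p.1
    pvAOuter row (s+1) rl'
  else rl
termination_by row.length - s

def merge_td_rows (table : List (List String)) : List (List String) :=
  table.map (fun row => pvAOuter row 0 row)

-- ===== PORT B =====
-- one grouping pass: take the maximal run at the head, emit merged cell + blanks, recurse
def pvBRow : List String → List String
  | [] => []
  | c :: rest =>
    let run := rest.takeWhile (fun x => x == c)
    let k := run.length + 1
    if k > 1 then
      (PySem.Str.replace c "<td" ("<td colspan=\"" ++ toString k ++ "\"")) ::
        (List.replicate (k-1) "" ++ pvBRow (rest.drop run.length))
    else c :: pvBRow rest
termination_by l => l.length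
decreasing_by
  · simp only [List.length_cons, List.length_drop]; omega
  · simp

def merge_td_rows_alt (table : List (List String)) : List (List String) :=
  table.map pvBRow

-- ===== PRECONDITION & SPEC =====
def Spec_merge_td_rows (table : List (List String)) (out : List (List String)) : Prop := out = merge_td_rows_alt table
instance (table : List (List String)) (out : List (List String)) : Decidable (Spec_merge_td_rows table out) := by unfold Spec_merge_td_rows; infer_instance

-- ===== CLAIM (what is proved, stated in full; the proofs are below) =====
def Claim_equal_merge_td_rows : Prop := ∀ (table : List (List String)), Dom_merge_td_rows table → Spec_merge_td_rows table (merge_td_rows table)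

-- ===== LEMMAS AND PROOFS =====

theorem pv_replace_empty (x : String) : PySem.Str.replace "" "<td" x = "" := by
  simp [PySem.Str.replace, PySem.Chars.replace, PySem.Chars.replace.go]

-- inner loop: blanks exactly the leading run of cells equal to sc, counts them
theorem pvAInner_spec (row : List String) (sc : String) :
    ∀ (suf pre : List String) (mc : Nat),
      (pre ++ suf).length = row.length →
      pvAInner row sc pre.length (pre ++ suf) mc =
        (pre ++ List.replicate (((row.drop pre.length).takeWhile (fun x => x == sc)).length) "" ++
           suf.drop (((row.drop pre.length).takeWhile (fun x => x == sc)).length),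
         mc + ((row.drop pre.length).takeWhile (fun x => x == sc)).length) := by
  intro suf
  induction suf with
  | nil =>
    intro pre mc hlen
    have hp : pre.length = row.length := by simpa using hlen
    have he : ¬ pre.length < row.length := by omega
    have hd : row.drop pre.length = [] := List.drop_eq_nil_of_le (by omega)
    rw [pvAInner]
    simp [he, hd]
  | cons v rest ih =>
    intro pre mc hlen
    have h1 : pre.length + (rest.length + 1) = row.length := by simpa using hlen
    have he : pre.length < row.length := by omega
    have hd : row.drop pre.length = row[pre.length] :: row.drop (pre.length + 1) :=
      List.drop_eq_getElem_cons he
    rw [pvAInner]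
    simp only [he, dif_pos]
    by_cases hsc : sc = row[pre.length]
    · have hbeq : (sc == row[pre.length]) = true := by simp [hsc]
      have hset : (pre ++ v :: rest).set pre.length "" = (pre ++ [""]) ++ rest := by
        simp
      rw [hbeq, if_pos rfl, hset]
      have hlen' : ((pre ++ [""]) ++ rest).length = row.length := by
        simp only [List.length_append, List.length_cons, List.length_nil]
        omega
      have := ih (pre ++ [""]) (mc + 1) hlen'
      simp only [List.length_append, List.length_singleton] at this
      rw [this]
      have hbeq' : (row[pre.length] == sc) = true := by simp [hsc]
      rw [hd, List.takeWhile_cons, hbeq']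
      simp [List.replicate_succ]
      omega
    · have hbeq : (sc == row[pre.length]) = false := by simp [hsc]
      rw [hbeq]
      simp only [Bool.false_eq_true, if_false]
      have hbeq' : (row[pre.length] == sc) = false := by simp [Ne.symm hsc]
      have hj : (List.takeWhile (fun x => x == sc) (row.drop pre.length)).length = 0 := by
        rw [hd, List.takeWhile_cons, hbeq']; simp
      simp [hj]

-- if the run at s+1 is nonempty, s+1 is in range and the cell there equals c
theorem pv_run_head (row : List String) (s : Nat) (c : String)
    (hj : 0 < ((row.drop (s+1)).takeWhile (fun x => x == c)).length) :
    s + 1 < row.length ∧ row.getD (s+1) "" = c := by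
  have hne : row.drop (s+1) ≠ [] := by
    intro h; rw [h] at hj; simp at hj
  have hlt : s + 1 < row.length := by
    by_contra h
    exact hne (List.drop_eq_nil_of_le (by omega))
  have hd : row.drop (s+1) = row[s+1] :: row.drop (s+1+1) :=
    List.drop_eq_getElem_cons hlt
  rw [hd, List.takeWhile_cons] at hj
  by_cases hb : (row[s+1] == c) = true
  · exact ⟨hlt, by rw [List.getD_eq_getElem _ _ hlt]; exact eq_of_beq hb⟩
  · rw [Bool.not_eq_true] at hb
    rw [hb] at hj; simp at hj

theorem pv_takeWhile_len_le (l : List String) (p : String → Bool) :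
    (l.takeWhile p).length ≤ l.length := by
  induction l with
  | nil => simp
  | cons a t ih => rw [List.takeWhile_cons]; split <;> simp; omega

theorem pv_getD_concat (pre l₂ l₃ : List String) (x : String) :
    (pre ++ [x] ++ l₂ ++ l₃).getD pre.length "" = x := by
  simp [List.getD]

theorem pv_set_concat (pre l₂ l₃ : List String) (x y : String) :
    (pre ++ [x] ++ l₂ ++ l₃).set pre.length y = pre ++ [y] ++ l₂ ++ l₃ := by
  simp

-- outer loop at position pre.length, with r already-blanked cells of the current run ahead
theorem pvAOuter_spec (row : List String) :
    ∀ (k r : Nat) (pre : List String),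
      row.length - pre.length ≤ k →
      pre.length + r ≤ row.length →
      (r = 0 ∨ ((row.drop pre.length).takeWhile
          (fun x => x == row.getD pre.length "")).length = r) →
      pvAOuter row pre.length (pre ++ List.replicate r "" ++ row.drop (pre.length + r)) =
        pre ++ List.replicate r "" ++ pvBRow (row.drop (pre.length + r)) := by
  intro k
  induction k with
  | zero =>
    intro r pre hk hsr hcond
    have hs : ¬ pre.length < row.length := by omega
    have hr : r = 0 := by omega
    subst hr
    have hd : row.drop pre.length = [] := List.drop_eq_nil_of_le (by omega)
    rw [pvAOuter]
    simp [hs, hd, pvBRow]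
  | succ k ih =>
    intro r pre hk hsr hcond
    by_cases hs : pre.length < row.length
    · rw [pvAOuter]
      simp only [hs, dif_pos]
      have hds : row.drop pre.length = row[pre.length] :: row.drop (pre.length + 1) :=
        List.drop_eq_getElem_cons hs
      rcases Nat.eq_zero_or_pos r with hr0 | hrpos
      · -- r = 0 : fresh run start, the cells from pre.length on are untouched
        subst hr0
        simp only [Nat.add_zero, List.replicate_zero, List.append_nil]
        have hlen : ((pre ++ [row[pre.length]]) ++ row.drop (pre.length+1)).length
            = row.length := by simp; omega
        have hinner := pvAInner_spec row row[pre.length] (row.drop (pre.length+1))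
          (pre ++ [row[pre.length]]) 0 hlen
        have hidx : (pre ++ [row[pre.length]]).length = pre.length + 1 := by simp
        rw [hidx] at hinner
        have harg : pre ++ row.drop pre.length =
            (pre ++ [row[pre.length]]) ++ row.drop (pre.length+1) := by
          rw [hds]; simp
        rw [harg, hinner]
        dsimp only
        simp only [Nat.zero_add]
        set j := ((row.drop (pre.length+1)).takeWhile
          (fun x => x == row[pre.length])).length with hjdef
        have hjle : j ≤ row.length - (pre.length+1) := by
          have := pv_takeWhile_len_le (row.drop (pre.length+1)) (fun x => x == row[pre.length])
          simp only [List.length_drop] at this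
          omega
        have hdj : (row.drop (pre.length+1)).drop j = row.drop (pre.length + 1 + j) := by
          rw [List.drop_drop]
        by_cases hjz : j = 0
        · -- singleton run
          rw [if_neg (by omega)]
          rw [hjz]
          simp only [List.replicate_zero, List.append_nil, List.drop_zero]
          have hih := ih 0 (pre ++ [row[pre.length]]) (by simp; omega) (by simp; omega)
            (Or.inl rfl)
          rw [hidx] at hih
          simp only [Nat.add_zero, List.replicate_zero, List.append_nil] at hih
          rw [hih]
          have hB : pvBRow (row.drop pre.length)
              = row[pre.length] :: pvBRow (row.drop (pre.length+1)) := by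
            rw [hds, pvBRow]
            simp [← hjdef, hjz]
          rw [hB]
          simp
        · -- run of length j+1 : merge
          rw [if_pos (by omega)]
          rw [pv_getD_concat, pv_set_concat, hdj]
          set v := PySem.Str.replace row[pre.length] "<td"
            ("<td colspan=\"" ++ toString (j + 1) ++ "\"") with hv
          have hlt1 := (pv_run_head row pre.length row[pre.length] (by omega)).1
          have hg1 := (pv_run_head row pre.length row[pre.length] (by omega)).2
          have hcnd : ((row.drop (pre.length+1)).takeWhile
              (fun x => x == row.getD (pre.length+1) "")).length = j := by
            rw [hg1]
          have hlenv : (pre ++ [v]).length = pre.length + 1 := by simp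
          have hih := ih j (pre ++ [v]) (by simp; omega) (by simp; omega)
            (by rw [hlenv]; exact Or.inr hcnd)
          rw [hlenv] at hih
          rw [hih]
          have hB : pvBRow (row.drop pre.length)
              = v :: (List.replicate j "" ++ pvBRow (row.drop (pre.length + 1 + j))) := by
            rw [hds, pvBRow]
            simp only [← hjdef]
            rw [if_pos (by omega)]
            simp [hv, hdj]
          rw [hB]
          simp
      · -- r ≥ 1 : we are inside a run whose tail is already blanked
        have hcnd0 : ((row.drop pre.length).takeWhile
            (fun x => x == row.getD pre.length "")).length = r := by
          rcases hcond with h | h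
          · omega
          · exact h
        have hgs : row.getD pre.length "" = row[pre.length] := List.getD_eq_getElem _ _ hs
        rw [hgs] at hcnd0
        have htail : ((row.drop (pre.length+1)).takeWhile
            (fun x => x == row[pre.length])).length = r - 1 := by
          rw [hds, List.takeWhile_cons, beq_self_eq_true] at hcnd0
          simp only [if_true, List.length_cons] at hcnd0
          omega
        have hrepl : List.replicate r ("" : String) = "" :: List.replicate (r-1) "" := by
          rw [← List.replicate_succ]; congr 1; omega
        have hlen : ((pre ++ [""]) ++ (List.replicate (r-1) "" ++ row.drop (pre.length+r))).length
            = row.length := by simp; omega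
        have hinner := pvAInner_spec row row[pre.length]
          (List.replicate (r-1) "" ++ row.drop (pre.length+r)) (pre ++ [""]) 0 hlen
        have hidx : ((pre ++ [""]) : List String).length = pre.length + 1 := by simp
        rw [hidx, htail] at hinner
        have hsufdrop : (List.replicate (r-1) ("" : String)
            ++ row.drop (pre.length+r)).drop (r-1) = row.drop (pre.length+r) := by
          rw [List.drop_append_of_le_length (by simp)]
          simp
        rw [hsufdrop] at hinner
        have harg : pre ++ List.replicate r "" ++ row.drop (pre.length + r) =
            (pre ++ [""]) ++ (List.replicate (r-1) "" ++ row.drop (pre.length+r)) := by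
          rw [hrepl]; simp
        rw [harg, hinner]
        dsimp only
        simp only [Nat.zero_add]
        by_cases hr1 : r = 1
        · -- last blanked cell of the run: merge_count stays 0
          subst hr1
          rw [if_neg (by omega)]
          simp only [Nat.sub_self, List.replicate_zero, List.append_nil]
          have hih := ih 0 (pre ++ [""]) (by simp; omega) (by simp; omega) (Or.inl rfl)
          rw [hidx] at hih
          simp only [Nat.add_zero, List.replicate_zero, List.append_nil] at hih
          rw [hih]
          simp
        · -- r ≥ 2: replace fires on an already-blanked cell, a no-op
          rw [if_pos (by omega)]
          rw [pv_getD_concat, pv_replace_empty, pv_set_concat]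
          have hlt1 := (pv_run_head row pre.length row[pre.length] (by omega)).1
          have hg1 := (pv_run_head row pre.length row[pre.length] (by omega)).2
          have hcnd : ((row.drop (pre.length+1)).takeWhile
              (fun x => x == row.getD (pre.length+1) "")).length = r - 1 := by
            rw [hg1]; exact htail
          have hih := ih (r-1) (pre ++ [""]) (by simp; omega) (by simp; omega)
            (by rw [hidx]; exact Or.inr hcnd)
          rw [hidx] at hih
          have hsr' : pre.length + 1 + (r - 1) = pre.length + r := by omega
          rw [hsr'] at hih
          rw [hih]
          rw [hrepl]
          simp
    · -- pre.length past the end: loop exits, nothing left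
      have hr : r = 0 := by omega
      subst hr
      have hd : row.drop pre.length = [] := List.drop_eq_nil_of_le (by omega)
      rw [pvAOuter]
      simp [hs, hd, pvBRow]

-- ===== VERDICT (by name: the statement is the Claim_ definition above) =====
theorem merge_td_rows_spec : Claim_equal_merge_td_rows := by
  intro table _
  unfold Spec_merge_td_rows merge_td_rows merge_td_rows_alt
  refine List.map_congr_left (fun row _ => ?_)
  have h := pvAOuter_spec row row.length 0 [] (by simp) (by simp) (Or.inl rfl)
  simpa using h
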